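-- pv_equiv track=rewrite | github.com/dmoratz/space_research | scripts/split_administrator.py | find_end_line
-- ===== SOURCE A (Python) =====
-- END_MARKER = "Contributors"
--
-- def find_end_line(lines: list[str], after_line: int) -> int:
--     """Find where the Contributors/copyright section starts."""
--     for i in range(after_line, len(lines)):
--         if lines[i].strip().rstrip('\r') == END_MARKER:
--             # Back up past blank lines
--             end = i
--             while end > 0 and not lines[end - 1].strip():
--                 end -= 1
--             return end
--     return len(lines)
-- ===== SOURCE B (Python) =====
-- END_MARKER = "Contributors"
--
-- def find_end_line(lines: list[str], after_line: int) -> int: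
--     """Single forward pass: track the last non-blank index; at the first
--     marker line at index >= after_line, the section starts right after it."""
--     last_nonblank = -1
--     for i, line in enumerate(lines):
--         if i >= after_line and line.strip() == END_MARKER:
--             return last_nonblank + 1
--         if line.strip():
--             last_nonblank = i
--     return len(lines)
-- ===== Notes on version B (the rewrite author's own statement) =====
-- stated objective: simpler
-- what changed: Replaces the scan-forward-then-back-up-over-blank-lines shape with one forward pass that maintains the last non-blank index and returns last_nonblank+1 at the first marker line at or after after_line.
-- outside the precondition, e.g. on find_end_line(['a', 'Contributors'], -1): A returns -1, B returns 1
import Mathlib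
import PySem

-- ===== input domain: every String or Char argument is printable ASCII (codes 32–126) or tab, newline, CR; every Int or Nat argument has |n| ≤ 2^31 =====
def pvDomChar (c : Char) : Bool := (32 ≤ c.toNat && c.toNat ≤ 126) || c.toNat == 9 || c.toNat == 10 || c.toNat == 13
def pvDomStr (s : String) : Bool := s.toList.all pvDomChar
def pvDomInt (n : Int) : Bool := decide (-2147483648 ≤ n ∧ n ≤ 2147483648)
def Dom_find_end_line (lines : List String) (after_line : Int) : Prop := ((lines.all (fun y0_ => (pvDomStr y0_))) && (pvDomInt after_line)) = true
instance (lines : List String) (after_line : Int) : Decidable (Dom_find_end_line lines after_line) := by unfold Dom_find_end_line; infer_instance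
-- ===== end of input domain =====

-- B changes the decomposition (one forward pass with a last-non-blank accumulator instead of
-- forward scan plus backward blank back-up); equivalence is claimed for after_line ≥ 0.

-- ===== PORT A =====
-- exact port of s.rstrip('\r'): drop trailing '\r' characters
def pvRstripCR (cs : List Char) : List Char := (cs.reverse.dropWhile (· == '\r')).reverse

-- lines[i].strip().rstrip('\r') == "Contributors"
def pvIsMarkerA (l : String) : Bool := pvRstripCR (PySem.Chars.strip l.toList) == "Contributors".toList

-- while end > 0 and not lines[end - 1].strip(): end -= 1
def pvBackup (lines : List String) : Nat → Int
  | 0 => 0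
  | e + 1 => if PySem.Chars.strip ((PySem.List.pyGetD lines ((e : Nat) : Int) "").toList) = []
             then pvBackup lines e else ((e : Int) + 1)

-- for i in range(after_line, len(lines)): … (early return)
def pvALoop (lines : List String) (i : Int) : Int :=
  if i < (lines.length : Int) then
    if pvIsMarkerA (PySem.List.pyGetD lines i "") then pvBackup lines i.toNat
    else pvALoop lines (i + 1)
  else (lines.length : Int)
termination_by ((lines.length : Int) - i).toNat
decreasing_by omega

def find_end_line (lines : List String) (after_line : Int) : Int :=
  pvALoop lines after_line

-- ===== PORT B =====
-- for i, line in enumerate(lines): … with last_nonblank accumulator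
def pvBLoop (lines : List String) (after_line : Int) : List String → Int → Int → Int
  | [], _, _ => (lines.length : Int)
  | l :: rest, i, last =>
    if after_line ≤ i ∧ PySem.Chars.strip l.toList = "Contributors".toList then last + 1
    else pvBLoop lines after_line rest (i + 1)
           (if PySem.Chars.strip l.toList ≠ [] then i else last)

def find_end_line_alt (lines : List String) (after_line : Int) : Int :=
  pvBLoop lines after_line lines 0 (-1)

-- ===== PRECONDITION & SPEC =====
-- Pre_ restricts to the natural domain of non-negative start indices: for negative after_line,
-- A's range start triggers Python's negative-index wraparound (accidental values, even a negative
-- return like -1) and an IndexError once after_line < -len(lines).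
def Pre_find_end_line (lines : List String) (after_line : Int) : Prop := 0 ≤ after_line
instance (lines : List String) (after_line : Int) : Decidable (Pre_find_end_line lines after_line) := by unfold Pre_find_end_line; infer_instance

def pvWitness_find_end_line : List String × Int := (["intro", "", "Contributors"], 0)

def Spec_find_end_line (lines : List String) (after_line : Int) (out : Int) : Prop := out = find_end_line_alt lines after_line
instance (lines : List String) (after_line : Int) (out : Int) : Decidable (Spec_find_end_line lines after_line out) := by unfold Spec_find_end_line; infer_instance

-- ===== CLAIM (what is proved, stated in full; the proofs are below) =====
def Claim_equal_find_end_line : Prop := ∀ (lines : List String) (after_line : Int), Dom_find_end_line lines after_line → Pre_find_end_line lines after_line → Spec_find_end_line lines after_line (find_end_line lines after_line)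

-- ===== LEMMAS AND PROOFS =====

-- last non-blank index among lines[0..n), or -1
def pvLastNB (lines : List String) : Nat → Int
  | 0 => -1
  | n + 1 => if PySem.Chars.strip ((PySem.List.pyGetD lines ((n : Nat) : Int) "").toList) = []
             then pvLastNB lines n else (n : Int)

lemma pvBackup_eq (lines : List String) : ∀ n, pvBackup lines n = pvLastNB lines n + 1 := by
  intro n
  induction n with
  | zero => simp [pvBackup, pvLastNB]
  | succ n ih =>
    simp only [pvBackup, pvLastNB]
    split <;> simp [ih]

lemma pvDropWhile_cr (y : List Char) :
    List.dropWhile (· == '\r') (List.dropWhile PySem.Chars.isspace y) = List.dropWhile PySem.Chars.isspace y := by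
  induction y with
  | nil => simp
  | cons c t ih =>
    by_cases h : PySem.Chars.isspace c = true
    · simp [List.dropWhile, h, ih]
    · have hc : (c == '\r') = false := by
        rcases Bool.eq_false_or_eq_true (c == '\r') with h' | h'
        · exfalso
          apply h
          have hc' : c = '\r' := by simpa using h'
          subst hc'
          decide
        · exact h'
      simp [List.dropWhile, h, hc]

lemma pvIsMarkerA_eq (l : String) :
    pvIsMarkerA l = (PySem.Chars.strip l.toList == "Contributors".toList) := by
  unfold pvIsMarkerA pvRstripCR
  rw [show PySem.Chars.strip l.toList
        = (List.dropWhile PySem.Chars.isspace (PySem.Chars.lstrip l.toList).reverse).reverse from rfl]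
  simp [pvDropWhile_cr]

lemma pvMain (lines : List String) (a : Int) :
    ∀ (rest : List String) (i : Nat), rest = lines.drop i →
      pvBLoop lines a rest (i : Int) (pvLastNB lines i) = pvALoop lines (max (i : Int) a) := by
  intro rest
  induction rest with
  | nil =>
    intro i hdrop
    have hlen : lines.length ≤ i := by
      by_contra h
      have := List.drop_eq_nil_iff.mp hdrop.symm
      omega
    rw [pvALoop]
    have hnl : ¬ (max (i : Int) a < (lines.length : Int)) := by
      have : (lines.length : Int) ≤ (i : Int) := by exact_mod_cast hlen
      omega
    simp only [hnl, if_false]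
    simp [pvBLoop]
  | cons l rest' ih =>
    intro i hdrop
    have hi : i < lines.length := by
      by_contra h
      rw [List.drop_eq_nil_of_le (by omega)] at hdrop
      simp at hdrop
    have hsome : lines[i]? = some l := by
      have h0 : (lines.drop i)[0]? = some l := by rw [← hdrop]; simp
      rw [List.getElem?_drop] at h0
      simpa using h0
    have hget : PySem.List.pyGetD lines ((i : Nat) : Int) "" = l := by
      simp [PySem.List.pyGetD_natCast, List.getD_eq_getElem?_getD, hsome]
    have hrest' : rest' = lines.drop (i + 1) := by
      have h1 := congrArg (List.drop 1) hdrop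
      simpa [List.drop_drop, Nat.add_comm] using h1
    have hlast : (if PySem.Chars.strip l.toList ≠ [] then ((i : Nat) : Int) else pvLastNB lines i)
        = pvLastNB lines (i + 1) := by
      simp only [pvLastNB, hget]
      split <;> rename_i hh <;> simp_all
    have hih := ih (i + 1) hrest'
    have hcast : ((i : Nat) : Int) + 1 = (((i + 1 : Nat) : Nat) : Int) := by push_cast; ring
    by_cases hge : a ≤ (i : Int)
    · have hmax : max (i : Int) a = (i : Int) := by omega
      rw [hmax, pvALoop]
      have hlt : ((i : Nat) : Int) < (lines.length : Int) := by exact_mod_cast hi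
      simp only [hlt, if_true, hget, pvIsMarkerA_eq]
      by_cases hm : PySem.Chars.strip l.toList = "Contributors".toList
      · simp only [pvBLoop, hge, hm, and_self, if_true, beq_iff_eq, pvBackup_eq]
        congr 1
      · simp only [pvBLoop, hm, and_false, if_false, beq_iff_eq]
        rw [hlast, hcast, hih]
        congr 1
        push_cast
        omega
    · simp only [pvBLoop, hge, false_and, if_false]
      rw [hlast, hcast, hih]
      congr 1
      push_cast
      omega

-- ===== VERDICT (by name: the statement is the Claim_ definition above) =====
theorem find_end_line_spec : Claim_equal_find_end_line := by
  intro lines a _ hpre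
  unfold Spec_find_end_line find_end_line find_end_line_alt
  have := pvMain lines a lines 0 (by simp)
  simp only [Nat.cast_zero, pvLastNB] at this
  rw [this]
  congr 1
  have : (0 : Int) ≤ a := hpre
  omega
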